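-- pv_equiv track=rewrite | github.com/LJH95224/langchainTest | LCELchain/chain-3.py | split_info_list
-- ===== SOURCE A (Python) =====
-- from typing import Iterator, List
--
-- def split_info_list(input: Iterator[str]) -> Iterator[List[str]]:
--     # 保存部分输入，直到遇到逗号
--     buffer = ""
--     for chunk in input:
--         # 将当前块添加到缓冲区
--         buffer += chunk
--         # 当缓冲区中有逗号的时候
--         while "," in buffer:
--             # 在逗号处分隔缓冲区
--             comma_index = buffer.index(",")
--             # 输出逗号之前的所有内容
--             yield [buffer[:comma_index].strip()]
--             # 保存剩余部分用于下一次迭代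
--             buffer = buffer[buffer.index(",") + 1:]
--         #
--         # # 输出最后一块
--         # if buffer.strip():
--         #     yield [buffer.strip()]
--     yield [buffer.strip()]
-- ===== SOURCE B (Python) =====
-- from typing import Iterator, List
--
-- def split_info_list(input: Iterator[str]) -> Iterator[List[str]]:
--     # idiomatic: materialize the stream and let str.split do the field splitting
--     s = "".join(input)
--     for field in s.split(","):
--         yield [field.strip()]
-- ===== Notes on version B (the rewrite author's own statement) =====
-- stated objective: faster
-- what changed: replaces the explicit buffer with a while-loop draining comma-prefixed segments by repeated index/slice with a single ''.join followed by str.split(',') and a per-field strip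
import Mathlib
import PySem

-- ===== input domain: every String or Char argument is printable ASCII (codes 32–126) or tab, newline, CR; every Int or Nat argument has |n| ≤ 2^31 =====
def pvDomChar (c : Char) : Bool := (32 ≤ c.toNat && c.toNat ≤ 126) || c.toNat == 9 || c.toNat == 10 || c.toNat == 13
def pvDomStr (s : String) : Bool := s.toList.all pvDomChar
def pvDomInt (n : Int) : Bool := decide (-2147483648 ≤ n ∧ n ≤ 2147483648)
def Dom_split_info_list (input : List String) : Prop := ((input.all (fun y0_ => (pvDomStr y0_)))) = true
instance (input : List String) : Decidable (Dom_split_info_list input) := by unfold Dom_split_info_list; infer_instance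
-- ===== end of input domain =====

-- B replaces A's buffer/while/index-slice streaming loop by one join + split(',') + per-field
-- strip (measured faster; same return value, the generator is modelled by its list of yields).
-- Strings are ported on List Char via .toList (exact; PySem.Chars are the string primitives).

-- ===== PORT A =====
-- the inner `while "," in buffer` loop: each pass yields the stripped prefix before the
-- first comma and keeps the remainder; acc collects the yields
def splitDrain (acc : List (List String)) (buf : List Char) : List (List String) × List Char :=
  if h : PySem.Chars.isIn [','] buf = true then
    let i : Int := PySem.Chars.find buf [',']   -- buffer.index(",")  (present, so find = index)
    splitDrain
      (acc ++ [[String.ofList (PySem.Chars.strip (PySem.Chars.slice buf none (some i)))]])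
      (PySem.Chars.slice buf (some (i + 1)) none)
  else (acc, buf)
termination_by buf.length
decreasing_by
  have hinf : [','] <:+: buf := (PySem.Chars.isIn_iff_infix _ _).mp h
  have hi : 0 ≤ PySem.Chars.find buf [','] := (PySem.Chars.find_nonneg_iff _ _).mpr hinf
  have hne : buf ≠ [] := by
    rintro rfl; simpa using hinf.sublist.length_le
  have : PySem.Chars.slice buf (some (PySem.Chars.find buf [','] + 1)) none
      = buf.drop (PySem.Chars.find buf [','] + 1).toNat := by
    rw [PySem.Chars.slice_eq_listSlice, PySem.List.slice_from buf (by omega)]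
  simp only [this, List.length_drop]
  have : 1 ≤ (PySem.Chars.find buf [','] + 1).toNat := by omega
  have hlen : 0 < buf.length := List.length_pos_of_ne_nil hne
  omega

def split_info_list (input : List String) : List (List String) :=
  let st := input.foldl (fun st chunk => splitDrain st.1 (st.2 ++ chunk.toList)) ([], ([] : List Char))
  st.1 ++ [[String.ofList (PySem.Chars.strip st.2)]]

-- ===== PORT B =====
def split_info_list_alt (input : List String) : List (List String) :=
  let s := PySem.Chars.join [] (input.map (·.toList))
  (PySem.Chars.splitOn s [',']).map (fun field => [String.ofList (PySem.Chars.strip field)])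

-- ===== PRECONDITION & SPEC =====
def Spec_split_info_list (input : List String) (out : List (List String)) : Prop := out = split_info_list_alt input
instance (input : List String) (out : List (List String)) : Decidable (Spec_split_info_list input out) := by unfold Spec_split_info_list; infer_instance

-- ===== CLAIM (what is proved, stated in full; the proofs are below) =====
def Claim_equal_split_info_list : Prop := ∀ (input : List String), Dom_split_info_list input → Spec_split_info_list input (split_info_list input)

-- ===== LEMMAS AND PROOFS =====

-- reference splitter: fields of l between commas, in order (always nonempty)
def sp (l : List Char) : List (List Char) :=
  match l with
  | [] => [[]]
  | c :: rest => if c = ',' then [] :: sp rest else (sp rest).modifyHead (c :: ·)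

theorem sp_ne_nil (l : List Char) : sp l ≠ [] := by
  induction l with
  | nil => simp [sp]
  | cons c rest ih =>
    by_cases h : c = ','
    · simp [sp, h]
    · simp only [sp, if_neg h]
      cases hr : sp rest with
      | nil => exact absurd hr ih
      | cons a t => simp

theorem sp_no_comma (l : List Char) (x : List Char) (hx : x ∈ sp l) : ',' ∉ x := by
  induction l generalizing x with
  | nil => simp [sp] at hx; simp [hx]
  | cons c rest ih =>
    by_cases h : c = ','
    · simp only [sp, if_pos h, List.mem_cons] at hx
      rcases hx with rfl | hx
      · simp
      · exact ih x hx
    · simp only [sp, if_neg h] at hx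
      cases hr : sp rest with
      | nil => exact absurd hr (sp_ne_nil rest)
      | cons a t =>
        rw [hr] at hx
        simp only [List.modifyHead_cons, List.mem_cons] at hx
        rcases hx with rfl | hx
        · intro hmem
          rcases List.mem_cons.mp hmem with hcc | ha
          · exact h hcc.symm
          · exact ih a (by rw [hr]; exact List.mem_cons_self) ha
        · exact ih x (by rw [hr]; exact List.mem_cons_of_mem _ hx)

theorem sp_of_no_comma (l : List Char) (h : ',' ∉ l) : sp l = [l] := by
  induction l with
  | nil => rfl
  | cons c rest ih =>
    have hc : c ≠ ',' := fun hc => h (by simp [hc])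
    have hr : ',' ∉ rest := fun hm => h (by simp [hm])
    simp [sp, hc, ih hr]

theorem sp_append (u v : List Char) :
    sp (u ++ v) = (sp u).dropLast ++ sp ((sp u).getLastD [] ++ v) := by
  induction u with
  | nil => simp [sp]
  | cons c u' ih =>
    by_cases h : c = ','
    · subst h
      have hl : sp (',' :: (u' ++ v)) = [] :: sp (u' ++ v) := by simp [sp]
      rw [List.cons_append, hl, ih]
      cases hr : sp u' with
      | nil => exact absurd hr (sp_ne_nil u')
      | cons a t => simp [sp, hr]
    · simp only [List.cons_append, sp, if_neg h, ih]
      cases hr : sp u' with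
      | nil => exact absurd hr (sp_ne_nil u')
      | cons a t =>
        cases t with
        | nil =>
          cases hv : sp (a ++ v) with
          | nil => exact absurd hv (sp_ne_nil (a ++ v))
          | cons b s => simp [sp, h, hv]
        | cons b t' =>
          simp

-- the first-comma decomposition A's inner loop step performs
theorem sp_take_comma_drop (buf : List Char) (h : [','] <:+: buf) :
    ',' ∉ buf.take (PySem.Chars.find buf [',']).toNat ∧
    buf = buf.take (PySem.Chars.find buf [',']).toNat ++
      ',' :: buf.drop ((PySem.Chars.find buf [',']).toNat + 1) := by
  have h0 : 0 ≤ PySem.Chars.find buf [','] := (PySem.Chars.find_nonneg_iff _ _).mpr h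
  obtain ⟨hp, hmin⟩ := PySem.Chars.find_spec h0
  have hil : (PySem.Chars.find buf [',']).toNat ≤ buf.length := by
    have := PySem.Chars.find_le_length buf [',']
    omega
  constructor
  · intro hc
    obtain ⟨j, hj, hjv⟩ := List.mem_iff_getElem.mp hc
    have hjlt : j < (PySem.Chars.find buf [',']).toNat := by
      simp only [List.length_take] at hj
      omega
    have hjb : j < buf.length := by omega
    have hjv' : buf[j] = ',' := by
      rw [List.getElem_take] at hjv
      exact hjv
    refine hmin j hjlt ⟨buf.drop (j + 1), ?_⟩
    rw [List.drop_eq_getElem_cons hjb, hjv']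
    rfl
  · obtain ⟨t, ht⟩ := hp
    have htt : buf.drop (PySem.Chars.find buf [',']).toNat = ',' :: t := by
      rw [← ht]; rfl
    have h1 : buf.drop ((PySem.Chars.find buf [',']).toNat + 1) = t := by
      have h2 := congrArg List.tail htt
      simpa [List.tail_drop] using h2
    conv_lhs => rw [← List.take_append_drop (PySem.Chars.find buf [',']).toNat buf]
    rw [htt, h1]

theorem modifyHead_id_fun {α : Type} (l : List α) : List.modifyHead (fun x => x) l = l := by
  cases l <;> simp

theorem sp_prepend (a v : List Char) (h : ',' ∉ a) : sp (a ++ v) = (sp v).modifyHead (a ++ ·) := by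
  induction a with
  | nil =>
    simp only [List.nil_append]
    conv_rhs => simp only [List.nil_append]
    rw [modifyHead_id_fun]
  | cons c a' ih =>
    have hc : c ≠ ',' := fun hc => h (by simp [hc])
    have ha : ',' ∉ a' := fun hm => h (by simp [hm])
    simp only [List.cons_append, sp, if_neg hc, ih ha, List.modifyHead_modifyHead]
    rfl

theorem splitOn_go_eq (fuel : Nat) (l cur : List Char) (acc : List (List Char))
    (h : l.length < fuel) :
    PySem.Chars.splitOn.go [','] fuel l cur acc
      = acc.reverse ++ ((sp l).modifyHead (cur.reverse ++ ·)) := by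
  induction fuel generalizing l cur acc with
  | zero => omega
  | succ fuel ih =>
    cases l with
    | nil => simp [PySem.Chars.splitOn.go, sp]
    | cons c rest =>
      by_cases hc : c = ','
      · subst hc
        have hstep : PySem.Chars.splitOn.go [','] (fuel + 1) (',' :: rest) cur acc
            = PySem.Chars.splitOn.go [','] fuel rest [] (cur.reverse :: acc) := by
          simp [PySem.Chars.splitOn.go, List.isPrefixOf]
        rw [hstep, ih rest [] _ (by simp at h; omega)]
        simp [sp]
        rw [modifyHead_id_fun]
      · have hstep : PySem.Chars.splitOn.go [','] (fuel + 1) (c :: rest) cur acc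
            = PySem.Chars.splitOn.go [','] fuel rest (c :: cur) acc := by
          simp [PySem.Chars.splitOn.go, List.isPrefixOf]
          exact fun h' => absurd h'.symm hc
        rw [hstep, ih rest (c :: cur) acc (by simp at h; omega)]
        simp only [sp, if_neg hc, List.modifyHead_modifyHead, List.reverse_cons]
        have hf : (fun x => cur.reverse ++ [c] ++ x)
            = ((fun x => cur.reverse ++ x) ∘ fun x => c :: x) := by
          funext x
          simp
        rw [hf]

theorem splitOn_eq_sp (s : List Char) : PySem.Chars.splitOn s [','] = sp s := by
  show PySem.Chars.splitOn.go [','] (s.length + 1) s [] [] = sp s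
  rw [splitOn_go_eq (s.length + 1) s [] [] (by omega)]
  simp only [List.reverse_nil, List.nil_append]
  rw [modifyHead_id_fun]

-- f: the per-field yield
theorem splitDrain_eq (acc : List (List String)) (buf : List Char) :
    splitDrain acc buf
      = (acc ++ ((sp buf).dropLast).map (fun f => [String.ofList (PySem.Chars.strip f)]),
         (sp buf).getLastD []) := by
  induction acc, buf using splitDrain.induct with
  | case1 acc buf h i ih =>
    have hinf : [','] <:+: buf := (PySem.Chars.isIn_iff_infix _ _).mp h
    have h0 : 0 ≤ PySem.Chars.find buf [','] := (PySem.Chars.find_nonneg_iff _ _).mpr hinf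
    obtain ⟨hnc, hdec⟩ := sp_take_comma_drop buf hinf
    rw [splitDrain, dif_pos h]
    have hsl1 : PySem.List.slice buf none (some i)
        = buf.take (PySem.Chars.find buf [',']).toNat := by
      rw [PySem.List.slice_to buf h0]
    have hsl2 : PySem.List.slice buf (some (i + 1)) none
        = buf.drop ((PySem.Chars.find buf [',']).toNat + 1) := by
      rw [PySem.List.slice_from buf (by omega)]
      congr 1
      omega
    simp only [PySem.Chars.slice_eq_listSlice] at ih ⊢
    rw [hsl1, hsl2] at ih ⊢
    rw [ih]
    have hsp : sp buf
        = buf.take (PySem.Chars.find buf [',']).toNat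
          :: sp (buf.drop ((PySem.Chars.find buf [',']).toNat + 1)) := by
      conv_lhs => rw [hdec]
      rw [sp_prepend _ _ hnc]
      simp [sp]
    rw [hsp]
    cases hs : sp (buf.drop ((PySem.Chars.find buf [',']).toNat + 1)) with
    | nil => exact absurd hs (sp_ne_nil _)
    | cons a t => simp
  | case2 acc buf h =>
    have hnc : ',' ∉ buf := by
      intro hm
      exact absurd ((PySem.Chars.isIn_iff_infix _ _).mpr
        ((List.singleton_infix_iff ',' buf).mpr hm)) (by simp [h])
    rw [splitDrain, dif_neg (by simp [h])]
    simp [sp_of_no_comma buf hnc]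

theorem sp_getLastD_no_comma (u : List Char) : ',' ∉ (sp u).getLastD [] := by
  cases hs : sp u with
  | nil => simp
  | cons a t =>
    rw [List.getLastD_cons]
    rcases List.mem_cons.mp (List.getLastD_mem_cons (l := t) (a := a)) with he | hm
    · rw [he]
      exact sp_no_comma u a (by rw [hs]; exact List.mem_cons_self)
    · exact sp_no_comma u _ (by rw [hs]; exact List.mem_cons_of_mem _ hm)

theorem loop_eq (chunks : List String) (acc : List (List String)) (buf : List Char)
    (h : ',' ∉ buf) :
    (chunks.foldl (fun st chunk => splitDrain st.1 (st.2 ++ chunk.toList)) (acc, buf)).1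
        ++ [[String.ofList (PySem.Chars.strip
            (chunks.foldl (fun st chunk => splitDrain st.1 (st.2 ++ chunk.toList)) (acc, buf)).2)]]
      = acc ++ (sp (buf ++ (chunks.map (·.toList)).flatten)).map
          (fun f => [String.ofList (PySem.Chars.strip f)]) := by
  induction chunks generalizing acc buf with
  | nil => simp [sp_of_no_comma buf h]
  | cons c rest ih =>
    rw [List.foldl_cons, splitDrain_eq]
    rw [ih _ _ (sp_getLastD_no_comma (buf ++ c.toList))]
    rw [List.map_cons, List.flatten_cons, ← List.append_assoc buf c.toList,
      sp_append (buf ++ c.toList) ((rest.map (·.toList)).flatten), List.map_append,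
      List.append_assoc]

theorem join_nil_eq_flatten (parts : List (List Char)) :
    PySem.Chars.join [] parts = parts.flatten := by
  induction parts with
  | nil => simp [PySem.Chars.join_nil]
  | cons p rest ih =>
    cases rest with
    | nil => simp [PySem.Chars.join_singleton]
    | cons q t =>
      rw [PySem.Chars.join_cons_cons, ih]
      simp

-- ===== VERDICT (by name: the statement is the Claim_ definition above) =====
theorem split_info_list_spec : Claim_equal_split_info_list := by
  intro input _
  show split_info_list input = split_info_list_alt input
  simp only [split_info_list, split_info_list_alt, join_nil_eq_flatten, splitOn_eq_sp]
  have := loop_eq input [] [] (by simp)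
  simpa using this
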